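-- pv_equiv track=rewrite | github.com/denasko/tms-lessons | Big_home_work/Hard_task/First_hard_task.py | calculate_diagonal
-- ===== SOURCE A (Python) =====
-- def calculate_diagonal(matrix: list, first_line) -> bool:
--     s = 0
--     res = []
--     for i, j in enumerate(matrix):
--         for k, v in enumerate(j):
--             if i == s and i == k:
--                 res.append(v)
--                 s += 1
--     if sum(res) == first_line:
--         return True
--     else:
--         return False
-- ===== SOURCE B (Python) =====
-- def calculate_diagonal(matrix: list, first_line) -> bool:
--     total = 0
--     for i, row in enumerate(matrix):
--         if len(row) <= i:
--             break
--         total += row[i]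
--     return total == first_line
-- ===== Notes on version B (the rewrite author's own statement) =====
-- stated objective: faster
-- what changed: Replace the nested scan over every cell (collecting diagonal elements into a list, then summing) with a single pass that indexes row[i] directly, stopping at the first row shorter than its index, and compares the running sum.
import Mathlib
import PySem

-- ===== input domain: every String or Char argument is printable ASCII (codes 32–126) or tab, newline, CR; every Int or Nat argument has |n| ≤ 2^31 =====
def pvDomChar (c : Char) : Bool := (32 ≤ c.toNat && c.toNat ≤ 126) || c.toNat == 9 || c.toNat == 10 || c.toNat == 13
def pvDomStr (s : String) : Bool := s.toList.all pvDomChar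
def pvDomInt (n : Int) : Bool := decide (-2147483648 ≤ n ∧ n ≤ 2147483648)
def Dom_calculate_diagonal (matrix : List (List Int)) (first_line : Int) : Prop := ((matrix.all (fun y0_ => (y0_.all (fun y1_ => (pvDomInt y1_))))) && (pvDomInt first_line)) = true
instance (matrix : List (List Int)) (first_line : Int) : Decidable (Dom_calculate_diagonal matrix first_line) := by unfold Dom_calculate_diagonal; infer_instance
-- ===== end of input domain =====

-- B replaces A's nested scan over every cell with one direct-indexing pass over the rows (faster).
-- ===== PORT A =====
-- inner 'for k, v in enumerate(j)' loop, carrying the state (s, res)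
def pvInnerA (i : Nat) : List Int → Nat → Int × List Int → Int × List Int
  | [], _, st => st
  | v :: rest, k, (s, res) =>
      if (i : Int) = s ∧ i = k then pvInnerA i rest (k + 1) (s + 1, res ++ [v])
      else pvInnerA i rest (k + 1) (s, res)

-- outer 'for i, j in enumerate(matrix)' loop
def pvOuterA : List (List Int) → Nat → Int × List Int → Int × List Int
  | [], _, st => st
  | row :: rest, i, st => pvOuterA rest (i + 1) (pvInnerA i row 0 st)

def calculate_diagonal (matrix : List (List Int)) (first_line : Int) : Bool :=
  let st := pvOuterA matrix 0 (0, [])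
  decide (st.2.sum = first_line)

-- ===== PORT B =====
-- one pass: add row[i] for each row until a row is shorter than its index
def pvGoB : List (List Int) → Nat → Int → Int
  | [], _, total => total
  | row :: rest, i, total =>
      if row.length ≤ i then total
      else pvGoB rest (i + 1) (total + row.getD i 0)

def calculate_diagonal_alt (matrix : List (List Int)) (first_line : Int) : Bool :=
  decide (pvGoB matrix 0 0 = first_line)

-- ===== PRECONDITION & SPEC =====
def Spec_calculate_diagonal (matrix : List (List Int)) (first_line : Int) (out : Bool) : Prop := out = calculate_diagonal_alt matrix first_line
instance (matrix : List (List Int)) (first_line : Int) (out : Bool) : Decidable (Spec_calculate_diagonal matrix first_line out) := by unfold Spec_calculate_diagonal; infer_instance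

-- ===== CLAIM (what is proved, stated in full; the proofs are below) =====
def Claim_equal_calculate_diagonal : Prop := ∀ (matrix : List (List Int)) (first_line : Int), Dom_calculate_diagonal matrix first_line → Spec_calculate_diagonal matrix first_line (calculate_diagonal matrix first_line)

-- ===== LEMMAS AND PROOFS =====
theorem pvInnerA_ne (i : Nat) (row : List Int) (k : Nat) (s : Int) (res : List Int)
    (h : (i : Int) ≠ s) : pvInnerA i row k (s, res) = (s, res) := by
  induction row generalizing k with
  | nil => rfl
  | cons v rest ih =>
      simp only [pvInnerA]
      rw [if_neg (by exact fun hc => h hc.1)]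
      exact ih (k + 1)

theorem pvInnerA_eq (i : Nat) (row : List Int) (k : Nat) (res : List Int) (hk : k ≤ i) :
    pvInnerA i row k ((i : Int), res) =
      if i - k < row.length then ((i : Int) + 1, res ++ [row.getD (i - k) 0]) else ((i : Int), res) := by
  induction row generalizing k res with
  | nil => simp [pvInnerA]
  | cons v rest ih =>
      by_cases hik : i = k
      · subst hik
        simp only [pvInnerA]
        simp only [and_self, if_true]
        rw [pvInnerA_ne _ _ _ _ _ (by omega)]
        simp
      · have hk' : k + 1 ≤ i := by omega
        simp only [pvInnerA]
        rw [if_neg (by exact fun hc => hik hc.2)]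
        rw [ih (k + 1) res hk']
        have h1 : (i - (k + 1) < rest.length) ↔ (i - k < (v :: rest).length) := by
          simp only [List.length_cons]; omega
        have h2 : (v :: rest).getD (i - k) 0 = rest.getD (i - (k + 1)) 0 := by
          have : i - k = (i - (k + 1)) + 1 := by omega
          rw [this]; rfl
        by_cases hlt : i - (k + 1) < rest.length
        · rw [if_pos hlt, if_pos (h1.mp hlt), h2]
        · rw [if_neg hlt, if_neg (fun hh => hlt (h1.mpr hh))]

theorem pvOuterA_stuck (matrix : List (List Int)) (i : Nat) (s : Int) (res : List Int)
    (h : s < (i : Int)) : pvOuterA matrix i (s, res) = (s, res) := by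
  induction matrix generalizing i with
  | nil => rfl
  | cons row rest ih =>
      simp only [pvOuterA]
      rw [pvInnerA_ne _ _ _ _ _ (by omega)]
      exact ih (i + 1) (by push_cast; omega)

theorem pvOuterA_sum (matrix : List (List Int)) (i : Nat) (res : List Int) :
    (pvOuterA matrix i ((i : Int), res)).2.sum = pvGoB matrix i res.sum := by
  induction matrix generalizing i res with
  | nil => rfl
  | cons row rest ih =>
      simp only [pvOuterA, pvGoB]
      rw [pvInnerA_eq i row 0 res (Nat.zero_le i)]
      simp only [Nat.sub_zero]
      by_cases h : i < row.length
      · rw [if_pos h, if_neg (by omega)]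
        have : ((i : Int) + 1) = ((i + 1 : Nat) : Int) := by push_cast; ring
        rw [this, ih (i + 1) (res ++ [row.getD i 0])]
        simp
      · rw [if_neg h, if_pos (by omega)]
        rw [pvOuterA_stuck rest (i + 1) i res (by push_cast; omega)]

-- ===== VERDICT (by name: the statement is the Claim_ definition above) =====
theorem calculate_diagonal_spec : Claim_equal_calculate_diagonal := by
  intro matrix first_line _
  unfold Spec_calculate_diagonal calculate_diagonal calculate_diagonal_alt
  have h := pvOuterA_sum matrix 0 []
  simp only [Nat.cast_zero, List.sum_nil] at h
  simp [h]
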